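-- pv_equiv track=rewrite | github.com/humuhumu33/HologramFire | tests/phase1_core/test_core.py | sum_mod256_rows_cols
-- ===== SOURCE A (Python) =====
-- def sum_mod256_rows_cols(state):
--     rows = len(state)
--     cols = len(state[0]) if rows else 0
--     # column sums (cycles)
--     col_sums = [0]*cols
--     row_sums = [0]*rows
--     for r in range(rows):
--         acc = 0
--         for c in range(cols):
--             v = int(state[r][c]) & 0xFF
--             acc = (acc + v) & 0xFF
--             col_sums[c] = (col_sums[c] + v) & 0xFF
--         row_sums[r] = acc
--     return row_sums, col_sums
-- ===== SOURCE B (Python) =====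
-- def sum_mod256_rows_cols(state):
--     rows = len(state)
--     cols = len(state[0]) if rows else 0
--     row_sums = [sum(state[r][c] & 0xFF for c in range(cols)) & 0xFF for r in range(rows)]
--     col_sums = []
--     for c in range(cols):
--         acc = 0
--         for r in range(rows):
--             acc = (acc + (state[r][c] & 0xFF)) & 0xFF
--         col_sums.append(acc)
--     return row_sums, col_sums
-- ===== Notes on version B (the rewrite author's own statement) =====
-- stated objective: alternative
-- what changed: A's single fused row-major loop that interleaves updates of row_sums and col_sums is replaced by two independent passes: row sums computed as a per-row total masked once at the end, and column sums computed by a separate column-major scan.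
import Mathlib
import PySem

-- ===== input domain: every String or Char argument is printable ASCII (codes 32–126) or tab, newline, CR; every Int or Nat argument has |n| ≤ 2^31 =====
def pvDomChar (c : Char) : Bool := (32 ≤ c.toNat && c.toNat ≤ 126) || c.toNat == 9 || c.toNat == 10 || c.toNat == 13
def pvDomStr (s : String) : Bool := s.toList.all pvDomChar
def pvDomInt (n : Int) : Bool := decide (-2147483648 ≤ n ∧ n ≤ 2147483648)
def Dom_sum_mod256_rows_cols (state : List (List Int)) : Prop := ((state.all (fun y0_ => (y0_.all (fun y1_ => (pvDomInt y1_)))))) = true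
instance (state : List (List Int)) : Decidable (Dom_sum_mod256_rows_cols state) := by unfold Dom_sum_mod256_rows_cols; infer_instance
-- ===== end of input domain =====

-- B replaces A's single fused row-major loop (which updates row and column sums together) by two
-- independent passes: row sums as a per-row total masked once at the end, and column sums by a
-- column-major scan; same values, different decomposition (objective: alternative).

-- ===== PORT A =====
-- 'x & 0xFF' (shared bit-mask primitive, used verbatim by both Pythons)
def pvMask (x : Int) : Int := PySem.Int.band x 255

def sum_mod256_rows_cols (state : List (List Int)) : List Int × List Int :=
  let rows : Int := PySem.List.len state
  let cols : Int := if rows ≠ 0 then PySem.List.len (PySem.List.pyGetD state 0 []) else 0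
  let res :=
    (PySem.List.pyRange 0 rows 1).foldl
      (fun (st : List Int × List Int) r =>
        let inner :=
          (PySem.List.pyRange 0 cols 1).foldl
            (fun (p : Int × List Int) c =>
              (pvMask (p.1 + pvMask (PySem.List.pyGetD (PySem.List.pyGetD state r []) c 0)),
               p.2.set c.toNat
                 (pvMask (PySem.List.pyGetD p.2 c 0 +
                          pvMask (PySem.List.pyGetD (PySem.List.pyGetD state r []) c 0)))))
            ((0 : Int), st.1)
        (inner.2, st.2.set r.toNat inner.1))
      (List.replicate cols.toNat (0 : Int), List.replicate rows.toNat (0 : Int))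
  (res.2, res.1)

-- ===== PORT B =====
def sum_mod256_rows_cols_alt (state : List (List Int)) : List Int × List Int :=
  let rows : Int := PySem.List.len state
  let cols : Int := if rows ≠ 0 then PySem.List.len (PySem.List.pyGetD state 0 []) else 0
  let rowSums :=
    (PySem.List.pyRange 0 rows 1).map (fun r =>
      pvMask (((PySem.List.pyRange 0 cols 1).map (fun c =>
        pvMask (PySem.List.pyGetD (PySem.List.pyGetD state r []) c 0))).foldl (· + ·) 0))
  let colSums :=
    (PySem.List.pyRange 0 cols 1).foldl
      (fun (out : List Int) c =>
        out ++ [(PySem.List.pyRange 0 rows 1).foldl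
          (fun acc r =>
            pvMask (acc + pvMask (PySem.List.pyGetD (PySem.List.pyGetD state r []) c 0)))
          0])
      []
  (rowSums, colSums)

-- ===== PRECONDITION & SPEC =====
-- Pre_ excludes exactly the jagged grids on which Python A raises IndexError (a row shorter than
-- the first row); B raises there as well.
def Pre_sum_mod256_rows_cols (state : List (List Int)) : Prop :=
  ∀ l ∈ state, (state.headD []).length ≤ l.length
instance (state : List (List Int)) : Decidable (Pre_sum_mod256_rows_cols state) := by
  unfold Pre_sum_mod256_rows_cols; infer_instance

def pvWitness_sum_mod256_rows_cols : List (List Int) := [[1, 2], [255, 300, -1]]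

def Spec_sum_mod256_rows_cols (state : List (List Int)) (out : List Int × List Int) : Prop := out = sum_mod256_rows_cols_alt state
instance (state : List (List Int)) (out : List Int × List Int) : Decidable (Spec_sum_mod256_rows_cols state out) := by unfold Spec_sum_mod256_rows_cols; infer_instance

-- ===== CLAIM (what is proved, stated in full; the proofs are below) =====
def Claim_equal_sum_mod256_rows_cols : Prop := ∀ (state : List (List Int)), Dom_sum_mod256_rows_cols state → Pre_sum_mod256_rows_cols state → Spec_sum_mod256_rows_cols state (sum_mod256_rows_cols state)

-- ===== LEMMAS AND PROOFS =====

theorem pvMask_nonneg (x : Int) : 0 ≤ pvMask x := by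
  unfold pvMask
  rw [PySem.Int.band_comm]
  exact PySem.Int.band_nonneg_of_nonneg_left _ (by norm_num)

theorem pvMask_of_nonneg {a : Int} (h : 0 ≤ a) : pvMask a = a % 256 := by
  unfold pvMask
  rw [PySem.Int.band_of_nonneg h (by norm_num)]
  have h2 : a.toNat &&& (255 : Int).toNat = a.toNat % 256 := by
    simpa using Nat.and_two_pow_sub_one_eq_mod a.toNat 8
  rw [h2]
  omega

theorem pvMask_add_left {a : Int} (b : Int) (ha : 0 ≤ a) (hb : 0 ≤ b) :
    pvMask (pvMask a + b) = pvMask (a + b) := by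
  rw [pvMask_of_nonneg ha, pvMask_of_nonneg (by omega), pvMask_of_nonneg (by omega)]
  omega

-- B's row pass (mask once at the end) computes A's running-masked fold.
theorem pv_maskfold (g : Int → Int) (hg : ∀ x, 0 ≤ g x) :
    ∀ (l : List Int) (a : Int), 0 ≤ a →
      l.foldl (fun acc c => pvMask (acc + g c)) (pvMask a) =
        pvMask (a + (l.map g).sum) := by
  intro l
  induction l with
  | nil => intro a _; simp
  | cons c l ih =>
    intro a ha
    have h1 : pvMask (pvMask a + g c) = pvMask (a + g c) :=
      pvMask_add_left (g c) ha (hg c)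
    simp only [List.foldl_cons, List.map_cons, List.sum_cons]
    rw [h1]
    have := ih (a + g c) (by have := hg c; omega)
    rw [this]
    ring_nf

-- Characterisation of A's inner (per-row) loop: first component is the running row sum,
-- second component updates every position j ≤ i < m of cs in place.
theorem pv_inner_char (f : Int → Int) (m : Int) :
    ∀ (n : Nat) (j a : Int) (cs : List Int), 0 ≤ j → (m - j).toNat = n →
      (((PySem.List.pyRange j m 1).foldl
          (fun (p : Int × List Int) c =>
            (pvMask (p.1 + f c), p.2.set c.toNat (pvMask (PySem.List.pyGetD p.2 c 0 + f c))))
          (a, cs)).1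
        = (PySem.List.pyRange j m 1).foldl (fun acc c => pvMask (acc + f c)) a)
      ∧ (((PySem.List.pyRange j m 1).foldl
          (fun (p : Int × List Int) c =>
            (pvMask (p.1 + f c), p.2.set c.toNat (pvMask (PySem.List.pyGetD p.2 c 0 + f c))))
          (a, cs)).2.length = cs.length)
      ∧ (∀ (i : Nat), i < cs.length →
          ((PySem.List.pyRange j m 1).foldl
            (fun (p : Int × List Int) c =>
              (pvMask (p.1 + f c), p.2.set c.toNat (pvMask (PySem.List.pyGetD p.2 c 0 + f c))))
            (a, cs)).2.getD i 0
          = if j ≤ (i : Int) ∧ (i : Int) < m then pvMask (cs.getD i 0 + f i) else cs.getD i 0) := by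
  intro n
  induction n with
  | zero =>
    intro j a cs hj hn
    rw [PySem.List.pyRange_one_eq_nil (by omega)]
    simp only [List.foldl_nil]
    refine ⟨by trivial, by trivial, ?_⟩
    intro i hi
    rw [if_neg (by omega)]
  | succ n ih =>
    intro j a cs hj hn
    have hjm : j < m := by omega
    rw [PySem.List.pyRange_one_cons hjm]
    simp only [List.foldl_cons]
    obtain ⟨ih1, ih2, ih3⟩ := ih (j + 1) (pvMask (a + f j))
      (cs.set j.toNat (pvMask (PySem.List.pyGetD cs j 0 + f j))) (by omega) (by omega)
    refine ⟨ih1, by rw [ih2, List.length_set], ?_⟩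
    intro i hi
    rw [ih3 i (by rw [List.length_set]; exact hi)]
    by_cases hij : (i : Int) = j
    · have hjt : j.toNat = i := by omega
      rw [if_neg (by omega), if_pos (by omega)]
      rw [List.getD_eq_getElem _ _ (by rwa [List.length_set]), List.getElem_set, if_pos hjt]
      rw [← hij, PySem.List.pyGetD_natCast, List.getD_eq_getElem _ _ hi]
    · have hset : (cs.set j.toNat (pvMask (PySem.List.pyGetD cs j 0 + f j))).getD i 0 = cs.getD i 0 := by
        rw [List.getD_eq_getElem _ _ (by rwa [List.length_set]), List.getElem_set,
          if_neg (by omega), List.getD_eq_getElem _ _ hi]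
      rw [hset]
      by_cases hcase : j + 1 ≤ (i : Int) ∧ (i : Int) < m
      · rw [if_pos hcase, if_pos (by omega)]
      · rw [if_neg hcase, if_neg (by omega)]

-- Characterisation of A's outer loop: columns accumulate row by row, each row slot gets its row sum.
theorem pv_outer_char (v : Int → Int → Int) (nR m : Int) :
    ∀ (n : Nat) (j : Int) (cs rs : List Int), 0 ≤ j → (nR - j).toNat = n →
      (((PySem.List.pyRange j nR 1).foldl
          (fun (st : List Int × List Int) r =>
            ((((PySem.List.pyRange 0 m 1).foldl
                (fun (p : Int × List Int) c =>
                  (pvMask (p.1 + v r c), p.2.set c.toNat (pvMask (PySem.List.pyGetD p.2 c 0 + v r c))))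
                ((0 : Int), st.1))).2,
             st.2.set r.toNat
               (((PySem.List.pyRange 0 m 1).foldl
                (fun (p : Int × List Int) c =>
                  (pvMask (p.1 + v r c), p.2.set c.toNat (pvMask (PySem.List.pyGetD p.2 c 0 + v r c))))
                ((0 : Int), st.1)).1)))
          (cs, rs)).1.length = cs.length)
      ∧ (((PySem.List.pyRange j nR 1).foldl
          (fun (st : List Int × List Int) r =>
            ((((PySem.List.pyRange 0 m 1).foldl
                (fun (p : Int × List Int) c =>
                  (pvMask (p.1 + v r c), p.2.set c.toNat (pvMask (PySem.List.pyGetD p.2 c 0 + v r c))))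
                ((0 : Int), st.1))).2,
             st.2.set r.toNat
               (((PySem.List.pyRange 0 m 1).foldl
                (fun (p : Int × List Int) c =>
                  (pvMask (p.1 + v r c), p.2.set c.toNat (pvMask (PySem.List.pyGetD p.2 c 0 + v r c))))
                ((0 : Int), st.1)).1)))
          (cs, rs)).2.length = rs.length)
      ∧ (∀ (i : Nat), i < cs.length → (i : Int) < m →
          ((PySem.List.pyRange j nR 1).foldl
          (fun (st : List Int × List Int) r =>
            ((((PySem.List.pyRange 0 m 1).foldl
                (fun (p : Int × List Int) c =>
                  (pvMask (p.1 + v r c), p.2.set c.toNat (pvMask (PySem.List.pyGetD p.2 c 0 + v r c))))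
                ((0 : Int), st.1))).2,
             st.2.set r.toNat
               (((PySem.List.pyRange 0 m 1).foldl
                (fun (p : Int × List Int) c =>
                  (pvMask (p.1 + v r c), p.2.set c.toNat (pvMask (PySem.List.pyGetD p.2 c 0 + v r c))))
                ((0 : Int), st.1)).1)))
          (cs, rs)).1.getD i 0
          = (PySem.List.pyRange j nR 1).foldl (fun acc r => pvMask (acc + v r i)) (cs.getD i 0))
      ∧ (∀ (i : Nat), i < rs.length →
          ((PySem.List.pyRange j nR 1).foldl
          (fun (st : List Int × List Int) r =>
            ((((PySem.List.pyRange 0 m 1).foldl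
                (fun (p : Int × List Int) c =>
                  (pvMask (p.1 + v r c), p.2.set c.toNat (pvMask (PySem.List.pyGetD p.2 c 0 + v r c))))
                ((0 : Int), st.1))).2,
             st.2.set r.toNat
               (((PySem.List.pyRange 0 m 1).foldl
                (fun (p : Int × List Int) c =>
                  (pvMask (p.1 + v r c), p.2.set c.toNat (pvMask (PySem.List.pyGetD p.2 c 0 + v r c))))
                ((0 : Int), st.1)).1)))
          (cs, rs)).2.getD i 0
          = if j ≤ (i : Int) ∧ (i : Int) < nR then
              (PySem.List.pyRange 0 m 1).foldl (fun acc c => pvMask (acc + v i c)) 0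
            else rs.getD i 0) := by
  intro n
  induction n with
  | zero =>
    intro j cs rs hj hn
    rw [PySem.List.pyRange_one_eq_nil (a := j) (b := nR) (by omega)]
    simp only [List.foldl_nil]
    refine ⟨by trivial, by trivial, ?_, ?_⟩
    · intro i hi him; trivial
    · intro i hi; rw [if_neg (by omega)]
  | succ n ih =>
    intro j cs rs hj hn
    have hjn : j < nR := by omega
    rw [PySem.List.pyRange_one_cons hjn]
    simp only [List.foldl_cons]
    obtain ⟨hin1, hin2, hin3⟩ := pv_inner_char (v j) m ((m - 0).toNat) 0 0 cs (by omega) rfl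
    obtain ⟨ih1, ih2, ih3, ih4⟩ := ih (j + 1)
      (((PySem.List.pyRange 0 m 1).foldl
        (fun (p : Int × List Int) c =>
          (pvMask (p.1 + v j c), p.2.set c.toNat (pvMask (PySem.List.pyGetD p.2 c 0 + v j c))))
        ((0 : Int), cs)).2)
      (rs.set j.toNat
        (((PySem.List.pyRange 0 m 1).foldl
          (fun (p : Int × List Int) c =>
            (pvMask (p.1 + v j c), p.2.set c.toNat (pvMask (PySem.List.pyGetD p.2 c 0 + v j c))))
          ((0 : Int), cs)).1))
      (by omega) (by omega)
    refine ⟨by rw [ih1, hin2], by rw [ih2, List.length_set], ?_, ?_⟩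
    · intro i hi him
      rw [ih3 i (by rw [hin2]; exact hi) him]
      rw [hin3 i hi, if_pos (by constructor <;> omega)]
    · intro i hi
      rw [ih4 i (by rw [List.length_set]; exact hi)]
      by_cases hij : (i : Int) = j
      · have hjt : j.toNat = i := by omega
        rw [if_neg (by omega), if_pos (by omega)]
        rw [List.getD_eq_getElem _ _ (by rwa [List.length_set]), List.getElem_set, if_pos hjt]
        rw [hin1, ← hij]
      · have hset : ∀ x : Int, (rs.set j.toNat x).getD i 0 = rs.getD i 0 := by
          intro x
          rw [List.getD_eq_getElem _ _ (by rwa [List.length_set]), List.getElem_set,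
            if_neg (by omega), List.getD_eq_getElem _ _ hi]
        rw [hset]
        by_cases hcase : j + 1 ≤ (i : Int) ∧ (i : Int) < nR
        · rw [if_pos hcase, if_pos (by omega)]
        · rw [if_neg hcase, if_neg (by omega)]

theorem pv_mask_zero : pvMask 0 = 0 := by
  rw [pvMask_of_nonneg le_rfl]; norm_num

theorem pv_main (state : List (List Int)) :
    sum_mod256_rows_cols state = sum_mod256_rows_cols_alt state := by
  simp only [sum_mod256_rows_cols, sum_mod256_rows_cols_alt]
  set nR : Int := PySem.List.len state with hnR
  set m : Int := if nR ≠ 0 then PySem.List.len (PySem.List.pyGetD state 0 []) else 0 with hm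
  have hn0 : 0 ≤ nR := by rw [hnR]; simp only [PySem.List.len_eq]; omega
  have hm0 : 0 ≤ m := by
    rw [hm]; split_ifs
    · simp only [PySem.List.len_eq]; omega
    · omega
  obtain ⟨o1, o2, o3, o4⟩ :=
    pv_outer_char (fun r c => pvMask (PySem.List.pyGetD (PySem.List.pyGetD state r []) c 0))
      nR m ((nR - 0).toNat) 0 (List.replicate m.toNat 0) (List.replicate nR.toNat 0)
      le_rfl rfl
  rw [Prod.mk.injEq]
  constructor
  · -- row sums
    apply List.ext_getElem
    · rw [o2, List.length_replicate, List.length_map, PySem.List.length_pyRange_one]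
      omega
    · intro i h1 h2
      rw [← List.getD_eq_getElem _ (0 : Int) h1]
      have hilt : i < nR.toNat := by
        have := h1; rwa [o2, List.length_replicate] at this
      rw [o4 i (by rw [List.length_replicate]; exact hilt)]
      rw [if_pos (by constructor <;> omega)]
      rw [List.getElem_map, PySem.List.getElem_pyRange_one, zero_add]
      have key := pv_maskfold
        (fun c => pvMask (PySem.List.pyGetD (PySem.List.pyGetD state (↑i) []) c 0))
        (fun _ => pvMask_nonneg _) (PySem.List.pyRange 0 m 1) 0 le_rfl
      rw [pv_mask_zero, zero_add] at key
      rw [key, ← List.sum_eq_foldl]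
  · -- column sums
    rw [PySem.List.foldl_append_singleton_eq_map, List.nil_append]
    apply List.ext_getElem
    · rw [o1, List.length_replicate, List.length_map, PySem.List.length_pyRange_one]
      omega
    · intro i h1 h2
      rw [← List.getD_eq_getElem _ (0 : Int) h1]
      have hilt : i < m.toNat := by
        have := h1; rwa [o1, List.length_replicate] at this
      rw [o3 i (by rw [List.length_replicate]; exact hilt) (by omega)]
      rw [List.getD_eq_getElem _ _ (by rw [List.length_replicate]; exact hilt),
        List.getElem_replicate]
      rw [List.getElem_map, PySem.List.getElem_pyRange_one, zero_add]

-- ===== VERDICT (by name: the statement is the Claim_ definition above) =====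
theorem sum_mod256_rows_cols_spec : Claim_equal_sum_mod256_rows_cols := by
  intro state _ _
  unfold Spec_sum_mod256_rows_cols
  exact pv_main state
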